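-- pv_equiv track=rewrite | github.com/xtanmaygarg/Project_Euler_Solutions | Problem 8.py | max_prod
-- ===== SOURCE A (Python) =====
-- def max_prod(num_list, length):
--     start = 0
--     prod_list = []
--     while start + length <= len(num_list):
--         prod = 1
--         for i in num_list[start: start+length]:
--             prod = prod * i
--         prod_list.append(prod)
--         start += 1
--     return max(prod_list)
-- ===== SOURCE B (Python) =====
-- def max_prod(num_list, length):
--     # O(n) sliding window: keep the product of the window's nonzero entries and
--     # a count of its zeros; slide by one, dividing out the leaving element.
--     if length == 0:
--         return 1  # every window is empty; the empty product is 1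
--     n = len(num_list)
--     zeros = 0
--     prod = 1
--     for x in num_list[:length]:
--         if x == 0:
--             zeros += 1
--         else:
--             prod *= x
--     best = prod if zeros == 0 else 0
--     for start in range(1, n - length + 1):
--         old = num_list[start - 1]
--         new = num_list[start + length - 1]
--         if old == 0:
--             zeros -= 1
--         else:
--             prod //= old
--         if new == 0:
--             zeros += 1
--         else:
--             prod *= new
--         cur = prod if zeros == 0 else 0
--         if cur > best:
--             best = cur
--     return best
-- ===== Notes on version B (the rewrite author's own statement) =====
-- stated objective: faster
-- what changed: A recomputes every window product from scratch (O(n*length)); B makes one sliding pass keeping the product of the window's nonzero entries and a count of its zeros, dividing out the leaving element, so each step is O(1).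
-- outside the precondition, e.g. on max_prod([1, 2, 3], -1): A returns 2, B raises IndexError
import Mathlib
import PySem

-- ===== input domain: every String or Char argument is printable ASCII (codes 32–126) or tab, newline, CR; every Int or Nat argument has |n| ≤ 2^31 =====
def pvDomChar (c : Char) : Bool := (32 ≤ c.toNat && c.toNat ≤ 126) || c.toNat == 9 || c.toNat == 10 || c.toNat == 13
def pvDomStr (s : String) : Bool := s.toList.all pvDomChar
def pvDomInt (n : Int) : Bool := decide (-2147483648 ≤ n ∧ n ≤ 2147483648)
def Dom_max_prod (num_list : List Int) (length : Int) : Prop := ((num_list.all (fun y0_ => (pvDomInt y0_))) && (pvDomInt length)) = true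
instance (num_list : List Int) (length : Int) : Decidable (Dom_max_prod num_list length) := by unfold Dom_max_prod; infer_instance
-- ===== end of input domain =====

-- B replaces A's per-window O(length) re-multiplication by a single O(n) sliding pass
-- that keeps the product of the window's nonzero entries plus a zero count (objective: faster).

-- ===== PORT A =====
-- while loop of A as fuel recursion; fuel = len(num_list)+2 suffices inside Pre_
def aLoop (num_list : List Int) (length : Int) : Nat → Int → List Int → List Int
  | 0, _, prod_list => prod_list
  | fuel + 1, start, prod_list =>
    if start + length ≤ (num_list.length : Int) then
      aLoop num_list length fuel (start + 1)
        (prod_list ++ [(PySem.List.slice num_list (some start) (some (start + length))).foldl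
          (fun prod i => prod * i) 1])
    else prod_list

def max_prod (num_list : List Int) (length : Int) : Int :=
  match PySem.List.max? (aLoop num_list length (num_list.length + 2) 0 []) (fun y => y) with
  | some m => m
  | none => 0   -- Python max([]) raises ValueError: excluded by Pre_

-- ===== PORT B =====
-- body of the first for loop of Source B (zeros, prod accumulator pair)
def zpStep (zp : Int × Int) (x : Int) : Int × Int :=
  if x = 0 then (zp.1 + 1, zp.2) else (zp.1, zp.2 * x)

-- body of the second for loop of Source B; state = (zeros, prod, best).
-- indexing uses pyGetD with default 0: inside Pre_ both indices are always in range.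
def bStep (num_list : List Int) (length : Int) (s : Int × Int × Int) (start : Int) : Int × Int × Int :=
  let old := PySem.List.pyGetD num_list (start - 1) 0
  let nw := PySem.List.pyGetD num_list (start + length - 1) 0
  let zp1 := if old = 0 then (s.1 - 1, s.2.1) else (s.1, PySem.Int.floordiv s.2.1 old)
  let zp2 := if nw = 0 then (zp1.1 + 1, zp1.2) else (zp1.1, zp1.2 * nw)
  let cur := if zp2.1 = 0 then zp2.2 else 0
  (zp2.1, zp2.2, if s.2.2 < cur then cur else s.2.2)

def max_prod_alt (num_list : List Int) (length : Int) : Int :=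
  if length = 0 then 1 else  -- every window is empty; the empty product is 1
  let n : Int := num_list.length
  let zp := (PySem.List.slice num_list none (some length)).foldl zpStep (0, 1)
  let best := if zp.1 = 0 then zp.2 else 0
  let st := (PySem.List.pyRange 1 (n - length + 1) 1).foldl (bStep num_list length) (zp.1, zp.2, best)
  st.2.2

-- ===== PRECONDITION & SPEC =====
-- Pre_ excludes length > len(num_list), where A's max([]) raises ValueError, and
-- length < 0, outside the natural domain of a window length (A's values there are
-- artefacts of negative-stop slices; B raises or returns other values).
def Pre_max_prod (num_list : List Int) (length : Int) : Prop :=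
  0 ≤ length ∧ length ≤ (num_list.length : Int)
instance (num_list : List Int) (length : Int) : Decidable (Pre_max_prod num_list length) := by
  unfold Pre_max_prod; infer_instance

def pvWitness_max_prod : List Int × Int := ([2, -3, 0, 4, 5], 2)

def Spec_max_prod (num_list : List Int) (length : Int) (out : Int) : Prop := out = max_prod_alt num_list length
instance (num_list : List Int) (length : Int) (out : Int) : Decidable (Spec_max_prod num_list length out) := by unfold Spec_max_prod; infer_instance

-- ===== CLAIM (what is proved, stated in full; the proofs are below) =====
def Claim_equal_max_prod : Prop := ∀ (num_list : List Int) (length : Int), Dom_max_prod num_list length → Pre_max_prod num_list length → Spec_max_prod num_list length (max_prod num_list length)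

-- ===== LEMMAS AND PROOFS =====

-- number of zeros in a list (as Int), product of its nonzero entries, plain product
def zcnt : List Int → Int
  | [] => 0
  | x :: w => (if x = 0 then 1 else 0) + zcnt w

def nzp : List Int → Int
  | [] => 1
  | x :: w => (if x = 0 then 1 else x) * nzp w

def lprod : List Int → Int
  | [] => 1
  | x :: w => x * lprod w

-- window starting at t and its product
def win (xs : List Int) (L : Nat) (t : Nat) : List Int := (xs.drop t).take L
def Wp (xs : List Int) (L : Nat) (t : Nat) : Int := lprod (win xs L t)

theorem foldl_mul_eq (w : List Int) : ∀ a : Int, w.foldl (fun prod i => prod * i) a = a * lprod w := by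
  induction w with
  | nil => intro a; simp [lprod]
  | cons x w ih => intro a; simp [List.foldl, lprod, ih, mul_assoc]

theorem foldl_zp_eq (w : List Int) : ∀ z p : Int, w.foldl zpStep (z, p) = (z + zcnt w, p * nzp w) := by
  induction w with
  | nil => intro z p; simp [zcnt, nzp]
  | cons x w ih =>
    intro z p
    by_cases hx : x = 0
    · simp [List.foldl, zpStep, hx, ih, zcnt, nzp, add_assoc]
    · simp [List.foldl, zpStep, hx, ih, zcnt, nzp, mul_assoc]

theorem lprod_char (w : List Int) : lprod w = if zcnt w = 0 then nzp w else 0 := by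
  induction w with
  | nil => simp [lprod, zcnt, nzp]
  | cons x w ih =>
    by_cases hx : x = 0
    · simp [lprod, zcnt, nzp, hx, ih]
      intro h
      have : (0:Int) ≤ zcnt w := by
        clear ih h
        induction w with
        | nil => simp [zcnt]
        | cons y w ihw => by_cases hy : y = 0 <;> simp [zcnt, hy] <;> omega
      omega
    · by_cases hz : zcnt w = 0 <;> simp [lprod, zcnt, nzp, hx, hz, ih]

theorem zcnt_append_singleton (w : List Int) (y : Int) :
    zcnt (w ++ [y]) = zcnt w + (if y = 0 then 1 else 0) := by
  induction w with
  | nil => simp [zcnt]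
  | cons x w ih => simp [zcnt, ih]; omega

theorem nzp_append_singleton (w : List Int) (y : Int) :
    nzp (w ++ [y]) = nzp w * (if y = 0 then 1 else y) := by
  induction w with
  | nil => simp [nzp]
  | cons x w ih => simp [nzp, ih]; ring_nf

theorem slice_win (xs : List Int) (L : Int) (hL : 0 ≤ L) (s : Nat) :
    PySem.List.slice xs (some (s : Int)) (some ((s : Int) + L)) = win xs L.toNat s := by
  rw [PySem.List.slice_toNat xs (by positivity) (by omega)]
  have h1 : ((s : Int)).toNat = s := by omega
  have h2 : ((s : Int) + L).toNat - ((s : Int)).toNat = L.toNat := by omega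
  rw [h2, h1]; rfl

-- A's while loop produces the list of all window products
theorem aLoop_spec (xs : List Int) (L : Int) (hL : 0 ≤ L) :
    ∀ (fuel : Nat) (s : Nat) (acc : List Int),
      (xs.length + 1 - L.toNat) - s ≤ fuel →
      aLoop xs L fuel (s : Int) acc
        = acc ++ (List.range ((xs.length + 1 - L.toNat) - s)).map (fun j => Wp xs L.toNat (s + j)) := by
  intro fuel
  induction fuel with
  | zero =>
    intro s acc h
    have : (xs.length + 1 - L.toNat) - s = 0 := by omega
    simp [aLoop, this]
  | succ fuel ih =>
    intro s acc h
    by_cases hc : (s : Int) + L ≤ (xs.length : Int)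
    · have hrem : (xs.length + 1 - L.toNat) - s = ((xs.length + 1 - L.toNat) - (s+1)) + 1 := by omega
      have hs1 : ((s : Int) + 1) = ((s + 1 : Nat) : Int) := by omega
      rw [aLoop, if_pos hc, slice_win xs L (by omega) s, foldl_mul_eq, one_mul, hs1,
        ih (s+1) _ (by omega), hrem, List.range_succ_eq_map]
      have hfun : ((fun j => Wp xs L.toNat (s + j)) ∘ Nat.succ)
          = fun j => Wp xs L.toNat (s + 1 + j) := by
        funext j
        simp only [Function.comp]
        congr 1
        omega
      simp only [List.map_cons, List.map_map, List.append_assoc, List.cons_append,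
        List.nil_append, Nat.add_zero, hfun]
      rfl
    · have : (xs.length + 1 - L.toNat) - s = 0 := by
        have : ¬ ((s:Int) + L ≤ (xs.length : Int)) := hc
        omega
      simp [aLoop, if_neg hc, this]

-- one step of B's sliding loop advances the window by one and folds the max
theorem bStep_spec (xs : List Int) (L' : Nat) (hL : 1 ≤ L') (s : Nat)
    (h : s + 1 + L' ≤ xs.length) (b : Int) :
    bStep xs (L' : Int) (zcnt (win xs L' s), nzp (win xs L' s), b) ((1 : Int) + (s : Nat)) =
      (zcnt (win xs L' (s+1)), nzp (win xs L' (s+1)), max b (Wp xs L' (s+1))) := by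
  obtain ⟨m, rfl⟩ : ∃ m, L' = m + 1 := ⟨L' - 1, by omega⟩
  have hsn : s < xs.length := by omega
  have hsln : s + (m + 1) < xs.length := by omega
  -- the two indexed elements
  have hold : PySem.List.pyGetD xs ((1 : Int) + (s:Nat) - 1) 0 = xs[s] := by
    have : ((1 : Int) + (s:Nat) - 1) = ((s : Nat) : Int) := by omega
    rw [this, PySem.List.pyGetD_natCast, List.getD_eq_getElem _ _ hsn]
  have hnew : PySem.List.pyGetD xs ((1 : Int) + (s:Nat) + ((m + 1 : Nat) : Int) - 1) 0
      = xs[s + (m + 1)] := by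
    have : ((1 : Int) + (s:Nat) + ((m + 1 : Nat) : Int) - 1) = ((s + (m + 1) : Nat) : Int) := by
      omega
    rw [this, PySem.List.pyGetD_natCast, List.getD_eq_getElem _ _ hsln]
  -- window decompositions
  have hw1 : win xs (m + 1) s = xs[s] :: (xs.drop (s+1)).take m := by
    unfold win
    rw [List.drop_eq_getElem_cons hsn, List.take_succ_cons]
  have hw2 : win xs (m + 1) (s+1) = (xs.drop (s+1)).take m ++ [xs[s + (m + 1)]] := by
    unfold win
    rw [List.take_add_one, List.getElem?_drop]
    have he : s + 1 + m = s + (m + 1) := by omega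
    rw [he, List.getElem?_eq_getElem hsln]
    rfl
  set t := (xs.drop (s+1)).take m with ht
  have hmax : ∀ b c : Int, (if b < c then c else b) = max b c := by
    intro b c; rw [max_def]; split_ifs <;> omega
  have hzs : zcnt (win xs (m + 1) s) = (if xs[s] = 0 then 1 else 0) + zcnt t := by
    rw [hw1]; rfl
  have hns : nzp (win xs (m + 1) s) = (if xs[s] = 0 then 1 else xs[s]) * nzp t := by
    rw [hw1]; rfl
  have hz1 : zcnt (win xs (m + 1) (s+1)) = zcnt t + (if xs[s + (m + 1)] = 0 then 1 else 0) := by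
    rw [hw2, zcnt_append_singleton]
  have hn1 : nzp (win xs (m + 1) (s+1)) = nzp t * (if xs[s + (m + 1)] = 0 then 1 else xs[s + (m + 1)]) := by
    rw [hw2, nzp_append_singleton]
  have hWp : Wp xs (m + 1) (s+1)
      = if zcnt (win xs (m + 1) (s+1)) = 0 then nzp (win xs (m + 1) (s+1)) else 0 := by
    rw [Wp, lprod_char]
  unfold bStep
  simp only [hold, hnew, hzs, hns, hz1, hn1, hWp, hmax]
  by_cases h1 : xs[s] = 0
  · by_cases h2 : xs[s + (m + 1)] = 0 <;>
      simp only [h1, h2, ite_true, ite_false] <;>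
      refine Prod.ext ?_ (Prod.ext ?_ ?_) <;>
      simp
  · have hfd : PySem.Int.floordiv (xs[s] * nzp t) xs[s] = nzp t :=
      Int.mul_fdiv_cancel_left _ h1
    by_cases h2 : xs[s + (m + 1)] = 0 <;>
      simp only [h1, h2, ite_true, ite_false, hfd] <;>
      refine Prod.ext ?_ (Prod.ext ?_ ?_) <;>
      simp

-- B's whole sliding loop computes the running max of all window products
theorem bLoop_spec (xs : List Int) (L' : Nat) (hL : 1 ≤ L') :
    ∀ (k s : Nat) (b : Int), s + k + L' ≤ xs.length →
      List.foldl (bStep xs (L' : Int)) (zcnt (win xs L' s), nzp (win xs L' s), b)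
          ((List.range k).map (fun j => (1 : Int) + ((s + j : Nat) : Int)))
        = (zcnt (win xs L' (s+k)), nzp (win xs L' (s+k)),
            (List.range k).foldl (fun b' j => max b' (Wp xs L' (s + 1 + j))) b) := by
  intro k
  induction k with
  | zero => intro s b _; simp
  | succ k ih =>
    intro s b h
    rw [List.range_succ_eq_map]
    simp only [List.map_cons, List.map_map, List.foldl_cons, Nat.add_zero]
    rw [bStep_spec xs L' hL s (by omega) b]
    have hfun : ((fun j => (1 : Int) + ((s + j : Nat) : Int)) ∘ Nat.succ)
        = fun j => (1 : Int) + ((s + 1 + j : Nat) : Int) := by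
      funext j
      simp only [Function.comp]
      omega
    rw [hfun, ih (s+1) (max b (Wp xs L' (s+1))) (by omega), List.foldl_map]
    have hsk : s + 1 + k = s + (k+1) := by omega
    rw [hsk]
    have hf : (fun (b' : Int) (j : Nat) => max b' (Wp xs L' (s + 1 + 1 + j)))
        = fun b' j => max b' (Wp xs L' (s + 1 + Nat.succ j)) := by
      funext b' j
      congr 2
      omega
    rw [hf]

-- ===== VERDICT (by name: the statement is the Claim_ definition above) =====
theorem max_prod_spec : Claim_equal_max_prod := by
  intro xs L _ hpre
  obtain ⟨hL0, hLn⟩ := hpre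
  unfold Spec_max_prod
  set L' := L.toNat with hL'
  have hLcast : (L' : Int) = L := by omega
  have hL'n : L' ≤ xs.length := by omega
  set K := xs.length - L' with hK
  have hL1 : 1 ≤ L ∨ L = 0 := by omega
  -- A's value
  have hA : max_prod xs L
      = (List.range K).foldl (fun b j => max b (Wp xs L' (j + 1))) (Wp xs L' 0) := by
    unfold max_prod
    have h0 : ((0 : Nat) : Int) = (0 : Int) := by norm_num
    rw [← h0, aLoop_spec xs L hL0 (xs.length + 2) 0 [] (by omega)]
    have hrem : xs.length + 1 - L.toNat - 0 = K + 1 := by omega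
    rw [hrem, List.range_succ_eq_map]
    simp only [List.map_cons, List.map_map, List.nil_append, Nat.add_zero]
    rw [PySem.List.max?_id_cons]
    have hc : ((fun j => Wp xs L.toNat (0 + j)) ∘ Nat.succ) = fun j => Wp xs L.toNat (j + 1) := by
      funext j
      simp only [Function.comp]
      congr 1
      omega
    rw [hc, List.foldl_map]
  -- B's value
  have hB : max_prod_alt xs L
      = (List.range K).foldl (fun b j => max b (Wp xs L' (j + 1))) (Wp xs L' 0) := by
    rcases hL1 with hL1 | hL0'
    swap
    · -- length = 0: every window is empty, every product is 1
      have hL'0 : L' = 0 := by omega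
      have hWp1 : ∀ t, Wp xs L' t = 1 := by
        intro t
        rw [hL'0]
        rfl
      have hfold : ∀ (l : List Nat),
          l.foldl (fun b j => max b (Wp xs L' (j + 1))) 1 = 1 := by
        intro l
        induction l with
        | nil => rfl
        | cons x l ihl => simpa [List.foldl_cons, hWp1] using ihl
      unfold max_prod_alt
      rw [if_pos hL0', hWp1 0, hfold]
    have hL'1 : 1 ≤ L' := by omega
    unfold max_prod_alt
    rw [if_neg (by omega)]
    have hsl : PySem.List.slice xs none (some L) = win xs L' 0 := by
      rw [PySem.List.slice_to xs (by omega)]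
      unfold win
      rw [List.drop_zero]
    rw [hsl, foldl_zp_eq]
    simp only [zero_add, one_mul]
    have hb0 : (if zcnt (win xs L' 0) = 0 then nzp (win xs L' 0) else 0) = Wp xs L' 0 := by
      rw [Wp, lprod_char]
    rw [PySem.List.pyRange_one]
    have hKr : ((xs.length : Int) - L + 1 - 1).toNat = K := by omega
    rw [hKr]
    have hmap : (List.range K).map (fun (k : Nat) => (1:Int) + (k : Int))
        = (List.range K).map (fun j => (1 : Int) + ((0 + j : Nat) : Int)) := by
      refine List.map_congr_left ?_
      intro j _
      norm_num
    rw [hmap, ← hLcast, bLoop_spec xs L' hL'1 K 0 _ (by omega)]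
    simp only [hb0]
    congr 1
    funext b' j
    congr 2
    omega
  rw [hA, hB]
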